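-- pv_equiv track=rewrite | github.com/Bhaskar-kumar-arya/all | DSA/hashTables.py | isAllUniqueInTable
-- ===== SOURCE A (Python) =====
-- from collections import defaultdict
--
-- def isAllUniqueInTable (Board : list[list[str]]) :
--     freq = defaultdict(int)
--     for i in range(3) :
--         for j in range(3) :
--             if Board[i][j] != "." and freq[Board[i][j]] == 1 :
--                 return False
--             freq[Board[i][j]] = 1
--     return True
-- ===== SOURCE B (Python) =====
-- def isAllUniqueInTable(Board: list[list[str]]):
--     vals = [Board[i][j] for i in range(3) for j in range(3) if Board[i][j] != "."]
--     return len(vals) == len(set(vals))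
-- ===== Notes on version B (the rewrite author's own statement) =====
-- stated objective: idiomatic
-- what changed: A's stateful scan with a defaultdict and an early return on the first repeated non-'.' cell is replaced by gathering all non-'.' cells in one comprehension and deciding duplicates once at the end by comparing the list's length with its set's size.
-- outside the precondition, e.g. on isAllUniqueInTable([['x', 'x']]): A returns False, B raises IndexError
import Mathlib
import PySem

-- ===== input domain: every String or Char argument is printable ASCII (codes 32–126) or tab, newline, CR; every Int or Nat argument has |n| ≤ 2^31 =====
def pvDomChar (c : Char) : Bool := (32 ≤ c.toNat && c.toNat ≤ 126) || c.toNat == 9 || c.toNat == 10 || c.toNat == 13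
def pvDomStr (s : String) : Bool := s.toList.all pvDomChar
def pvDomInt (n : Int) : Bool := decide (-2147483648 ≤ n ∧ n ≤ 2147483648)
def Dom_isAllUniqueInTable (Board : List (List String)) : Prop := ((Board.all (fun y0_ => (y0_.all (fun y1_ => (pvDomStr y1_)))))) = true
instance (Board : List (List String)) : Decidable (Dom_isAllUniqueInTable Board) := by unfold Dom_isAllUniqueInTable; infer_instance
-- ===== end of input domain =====

-- B replaces A's stateful defaultdict scan with early return by gathering all non-"." cells
-- and comparing the list length with the set size once at the end (idiomatic; same cost).


-- Board[i][j]; total (Pre_ guarantees the indices are in range, where the defaults are unreachable)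
def pvCell (Board : List (List String)) (i j : Int) : String :=
  (PySem.List.pyGet? ((PySem.List.pyGet? Board i).getD []) j).getD ""

-- ===== PORT A =====
-- inner 'for j in range(3)' loop: none = early 'return False', some f = fall through with freq f
def pvAInner (Board : List (List String)) (i : Int) :
    List Int → PySem.Dict String Int → Option (PySem.Dict String Int)
  | [], freq => some freq
  | j :: js, freq =>
      let c := pvCell Board i j
      if (c != ".") && (freq.getD c 0 == 1) then none
      else pvAInner Board i js (freq.insert c 1)

-- outer 'for i in range(3)' loop
def pvAOuter (Board : List (List String)) : List Int → PySem.Dict String Int → Bool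
  | [], _ => true
  | i :: is, freq =>
      match pvAInner Board i (PySem.List.pyRange 0 3 1) freq with
      | none => false
      | some f => pvAOuter Board is f

def isAllUniqueInTable (Board : List (List String)) : Bool :=
  pvAOuter Board (PySem.List.pyRange 0 3 1) PySem.Dict.empty

-- ===== PORT B =====
def isAllUniqueInTable_alt (Board : List (List String)) : Bool :=
  let vals := (PySem.List.pyRange 0 3 1).flatMap (fun i =>
    (PySem.List.pyRange 0 3 1).filterMap (fun j =>
      if pvCell Board i j != "." then some (pvCell Board i j) else none))
  decide (vals.length = (PySem.Set.ofList vals).length)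

-- ===== PRECONDITION & SPEC =====
-- Pre_ excludes malformed boards (fewer than 3 rows, or one of the first 3 rows with fewer
-- than 3 cells): there Python B raises IndexError, and Python A either raises IndexError too
-- or accidentally returns False when its scan meets a duplicate before the missing cell —
-- an artefact of A's early return on a board outside the function's 3x3 domain.
def Pre_isAllUniqueInTable (Board : List (List String)) : Prop :=
  3 ≤ Board.length ∧ ∀ row ∈ Board.take 3, 3 ≤ row.length
instance (Board : List (List String)) : Decidable (Pre_isAllUniqueInTable Board) := by
  unfold Pre_isAllUniqueInTable; infer_instance

def pvWitness_isAllUniqueInTable : List (List String) :=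
  [["1", "2", "3"], ["4", "5", "6"], ["7", "8", "."]]

def Spec_isAllUniqueInTable (Board : List (List String)) (out : Bool) : Prop := out = isAllUniqueInTable_alt Board
instance (Board : List (List String)) (out : Bool) : Decidable (Spec_isAllUniqueInTable Board out) := by unfold Spec_isAllUniqueInTable; infer_instance

-- ===== CLAIM (what is proved, stated in full; the proofs are below) =====
def Claim_equal_isAllUniqueInTable : Prop := ∀ (Board : List (List String)), Dom_isAllUniqueInTable Board → Pre_isAllUniqueInTable Board → Spec_isAllUniqueInTable Board (isAllUniqueInTable Board)

-- ===== LEMMAS AND PROOFS =====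

-- A's scan, with the two loops flattened into one pass over the cell values
def pvScanD : List String → PySem.Dict String Int → Option (PySem.Dict String Int)
  | [], freq => some freq
  | c :: cs, freq =>
      if (c != ".") && (freq.getD c 0 == 1) then none
      else pvScanD cs (freq.insert c 1)

theorem pvAInner_eq (Board : List (List String)) (i : Int) :
    ∀ (js : List Int) (freq : PySem.Dict String Int),
      pvAInner Board i js freq = pvScanD (js.map (pvCell Board i)) freq := by
  intro js
  induction js with
  | nil => intro freq; rfl
  | cons j js ih =>
      intro freq
      simp only [pvAInner, pvScanD, List.map]
      split
      · rfl
      · exact ih _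

theorem pvScanD_append (xs ys : List String) :
    ∀ freq, pvScanD (xs ++ ys) freq = (pvScanD xs freq).bind (pvScanD ys) := by
  induction xs with
  | nil => intro freq; rfl
  | cons c cs ih =>
      intro freq
      simp only [List.cons_append, pvScanD]
      split
      · rfl
      · exact ih _

theorem pvAOuter_eq (Board : List (List String)) :
    ∀ (is : List Int) (freq : PySem.Dict String Int),
      pvAOuter Board is freq =
        (pvScanD (is.flatMap (fun i => (PySem.List.pyRange 0 3 1).map (pvCell Board i))) freq).isSome := by
  intro is
  induction is with
  | nil => intro freq; rfl
  | cons i is ih =>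
      intro freq
      simp only [pvAOuter, List.flatMap_cons, pvScanD_append, pvAInner_eq]
      cases pvScanD ((PySem.List.pyRange 0 3 1).map (pvCell Board i)) freq with
      | none => rfl
      | some f => exact ih f

theorem pvScanD_spec :
    ∀ (cs : List String) (freq : PySem.Dict String Int) (P : String → Bool),
      (∀ c, (freq.getD c 0 == 1) = P c) →
      ((pvScanD cs freq).isSome = true ↔
        ((cs.filter (fun c => c != ".")).Nodup ∧
          ∀ c ∈ cs.filter (fun c => c != "."), P c = false)) := by
  intro cs
  induction cs with
  | nil => intro freq P h; simp [pvScanD]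
  | cons c cs ih =>
      intro freq P h
      have hins : ∀ x, ((freq.insert c 1).getD x 0 == 1) = ((x == c) || P x) := by
        intro x
        by_cases hx : x = c
        · subst hx; simp [PySem.Dict.getD_insert]
        · simp [PySem.Dict.getD_insert, hx, h x]
      by_cases hdot : c = "."
      · subst hdot
        simp only [pvScanD, bne_self_eq_false, Bool.false_and, Bool.false_eq_true,
          if_false]
        rw [ih _ _ hins]
        simp only [List.filter_cons, bne_self_eq_false, Bool.false_eq_true, if_false]
        have hfix : ∀ x ∈ cs.filter (fun c => c != "."), ((x == ".") || P x) = P x := by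
          intro x hx
          have hxne := List.of_mem_filter hx
          simp only [bne_iff_ne, ne_eq] at hxne
          simp [hxne]
        constructor
        · rintro ⟨h1, h2⟩
          refine ⟨h1, fun x hx => ?_⟩
          have h3 := h2 x hx
          rwa [hfix x hx] at h3
        · rintro ⟨h1, h2⟩
          refine ⟨h1, fun x hx => ?_⟩
          rw [hfix x hx]; exact h2 x hx
      · have hne : (c != ".") = true := by simp [bne_iff_ne, hdot]
        by_cases hP : P c = true
        · have hPt : P c = true := hP
          simp only [pvScanD, hne, h c, hPt, Bool.true_and, if_true]
          simp only [Option.isSome_none]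
          constructor
          · intro hfalse; cases hfalse
          · rintro ⟨_, h2⟩
            have := h2 c (by simp [List.mem_filter, hne])
            rw [hP] at this; cases this
        · have hPc : P c = false := by revert hP; cases P c <;> simp
          simp only [pvScanD, hne, h c, hPc, Bool.and_false,
            Bool.false_eq_true, if_false]
          rw [ih _ _ hins]
          have hfc : List.filter (fun c => c != ".") (c :: cs)
              = c :: cs.filter (fun c => c != ".") := by
            simp [hne]
          rw [hfc]
          simp only [List.nodup_cons, List.mem_cons, forall_eq_or_imp, hPc]
          constructor
          · rintro ⟨h1, h2⟩
            have hnotmem : c ∉ cs.filter (fun c => c != ".") := by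
              intro hc
              have := h2 c hc
              simp at this
            refine ⟨⟨hnotmem, h1⟩, trivial, ?_⟩
            intro x hx
            have := h2 x hx
            rcases Bool.or_eq_false_iff.mp this with ⟨_, hPx⟩
            exact hPx
          · rintro ⟨⟨hnm, h1⟩, _, h2⟩
            refine ⟨h1, ?_⟩
            intro x hx
            have hxc : (x == c) = false := by
              by_cases hxeq : x = c
              · subst hxeq; exact absurd hx hnm
              · simp [hxeq]
            simp [hxc, h2 x hx]

-- set(vs) has as many elements as vs iff vs has no duplicates
theorem pvFoldlAdd_le (l : List String) :
    ∀ s : List String, (l.foldl PySem.Set.add s).length ≤ s.length + l.length := by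
  induction l with
  | nil => intro s; simp
  | cons x l ih =>
      intro s
      simp only [List.foldl_cons, List.length_cons]
      calc (l.foldl PySem.Set.add (PySem.Set.add s x)).length
          ≤ (PySem.Set.add s x).length + l.length := ih _
        _ ≤ (s.length + 1) + l.length := by
            simp only [PySem.Set.add]
            split <;> simp
        _ = s.length + (l.length + 1) := by omega

theorem pvFoldlAdd_eq_iff (l : List String) :
    ∀ s : List String,
      ((l.foldl PySem.Set.add s).length = s.length + l.length ↔
        (l.Nodup ∧ ∀ x ∈ l, x ∉ s)) := by
  induction l with
  | nil => intro s; simp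
  | cons x l ih =>
      intro s
      simp only [List.foldl_cons, List.length_cons, List.nodup_cons, List.mem_cons]
      by_cases hx : x ∈ s
      · have hadd : PySem.Set.add s x = s := by
          simp [PySem.Set.add, PySem.Set.contains, hx]
        rw [hadd]
        constructor
        · intro h; have := pvFoldlAdd_le l s; omega
        · rintro ⟨_, h2⟩; exact absurd hx (h2 x (Or.inl rfl))
      · have hadd : PySem.Set.add s x = s ++ [x] := by
          simp [PySem.Set.add, PySem.Set.contains, hx]
        rw [hadd]
        have hlen : (s ++ [x]).length = s.length + 1 := by simp
        constructor
        · intro h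
          obtain ⟨h1, h2⟩ := (ih (s ++ [x])).mp (by rw [hlen]; omega)
          have hxl : x ∉ l := fun hm => by simpa using h2 x hm
          refine ⟨⟨hxl, h1⟩, ?_⟩
          rintro y (rfl | hy)
          · exact hx
          · intro hys; exact (h2 y hy) (by simp [hys])
        · rintro ⟨⟨hxl, h1⟩, h2⟩
          have h' : (l.foldl PySem.Set.add (s ++ [x])).length
              = (s ++ [x]).length + l.length := by
            rw [ih]
            refine ⟨h1, fun y hy => ?_⟩
            simp only [List.mem_append, List.mem_singleton]
            rintro (hys | rfl)
            · exact (h2 y (Or.inr hy)) hys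
            · exact hxl hy
          rw [h', hlen]; omega

theorem pvSetLen_iff (vs : List String) :
    vs.length = (PySem.Set.ofList vs).length ↔ vs.Nodup := by
  have h := pvFoldlAdd_eq_iff vs []
  simp only [List.length_nil, List.not_mem_nil, not_false_iff, implies_true, and_true] at h
  rw [show PySem.Set.ofList vs = vs.foldl PySem.Set.add [] from rfl]
  constructor
  · intro hlen; exact h.mp (by omega)
  · intro hnd; have := h.mpr hnd; omega

theorem pvComprehension_eq (Board : List (List String)) :
    ((PySem.List.pyRange 0 3 1).flatMap (fun i =>
      (PySem.List.pyRange 0 3 1).filterMap (fun j =>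
        if pvCell Board i j != "." then some (pvCell Board i j) else none)))
    = ((PySem.List.pyRange 0 3 1).flatMap (fun i =>
        (PySem.List.pyRange 0 3 1).map (pvCell Board i))).filter (fun c => c != ".") := by
  have h1 : ∀ (i : Int) (js : List Int),
      (js.filterMap (fun j =>
        if pvCell Board i j != "." then some (pvCell Board i j) else none))
      = (js.map (pvCell Board i)).filter (fun c => c != ".") := by
    intro i js
    induction js with
    | nil => rfl
    | cons j js ih =>
        simp only [List.filterMap_cons, List.map_cons, List.filter_cons]
        rw [ih]
        by_cases hc : pvCell Board i j = "."
        · simp [hc]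
        · simp [hc]
  have h2 : ∀ (L M : List Int),
      (L.flatMap (fun i => ((M.map (pvCell Board i)).filter (fun c => c != "."))))
      = (L.flatMap (fun i => M.map (pvCell Board i))).filter (fun c => c != ".") := by
    intro L M
    induction L with
    | nil => rfl
    | cons a as ih2 => simp [List.flatMap_cons, List.filter_append, ih2]
  simp only [h1]
  exact h2 _ _

-- ===== VERDICT (by name: the statement is the Claim_ definition above) =====
theorem isAllUniqueInTable_spec : Claim_equal_isAllUniqueInTable := by
  intro Board _ _
  unfold Spec_isAllUniqueInTable isAllUniqueInTable isAllUniqueInTable_alt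
  rw [pvAOuter_eq, pvComprehension_eq]
  have hscan := pvScanD_spec
    ((PySem.List.pyRange 0 3 1).flatMap (fun i =>
      (PySem.List.pyRange 0 3 1).map (pvCell Board i)))
    PySem.Dict.empty (fun _ => false)
    (by intro c; simp [PySem.Dict.getD_empty])
  rw [Bool.eq_iff_iff, hscan, decide_eq_true_iff, pvSetLen_iff]
  simp
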